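-- pv_equiv track=rewrite | github.com/dariadau/str_counters | func_1/code.py | words_counter
-- ===== SOURCE A (Python) =====
-- def words_counter(input_line='one two one tho three'):
--     # Подготавливаем словарь для сбора отдельных слов и их подсчёта
--     words_dict = dict()
--     # Подготавливаем пустую строку для сбора результатов подсчёта
--     count_str = ''
--
--     # Разделяем входное предложение на отдельные слова и итерируем каждое слово
--     for word in input_line.split():
--         if word not in words_dict:
--             # Если текущее слово ещё не находится в словаре, тогда присваиваем счётчик как 0
--             words_dict[word] = 0
--         else:
--             # Если текущее слово есть уже в словаре, тогда увеличиваем счётчик на 1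
--             words_dict[word] += 1
--         # добавляем результат в строку count_str для текущего слова
--         count_str += str(words_dict[word]) + ' '
--     # Возвращаем результат
--     return count_str
-- ===== SOURCE B (Python) =====
-- def words_counter(input_line='one two one tho three'):
--     words = input_line.split()
--     out = [''] * len(words)
--     for w in dict.fromkeys(words):
--         k = 0
--         for i, u in enumerate(words):
--             if u == w:
--                 out[i] = str(k)
--                 k += 1
--     return ''.join(p + ' ' for p in out)
-- ===== Notes on version B (the rewrite author's own statement) =====
-- stated objective: alternative
-- what changed: Replaces A's single pass with an incrementally-updated word->counter dict by a staged algorithm: split once, preallocate an output slot per word, then for each distinct word (first-occurrence order) scan the whole word list numbering that word's occurrences into its slots, and finally join the slots.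
import Mathlib
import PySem

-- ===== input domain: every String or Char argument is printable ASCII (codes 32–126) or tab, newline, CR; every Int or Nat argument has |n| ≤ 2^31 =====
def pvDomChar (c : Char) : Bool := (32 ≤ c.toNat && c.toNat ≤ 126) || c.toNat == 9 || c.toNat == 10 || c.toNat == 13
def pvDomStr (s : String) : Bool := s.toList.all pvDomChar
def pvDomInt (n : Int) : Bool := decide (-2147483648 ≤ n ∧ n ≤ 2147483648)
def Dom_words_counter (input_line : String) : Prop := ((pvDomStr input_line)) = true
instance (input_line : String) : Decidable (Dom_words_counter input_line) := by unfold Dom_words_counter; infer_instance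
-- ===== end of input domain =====

-- B is a staged re-implementation (group-by-distinct-word numbering into preallocated
-- slots, then join) of A's one-pass dict-counter loop; alternative, not faster.

-- ===== PORT A =====
-- loop body of A: update words_dict for the word, then append its counter and a space
def wcStepA (st : PySem.Dict String Int × String) (word : String) : PySem.Dict String Int × String :=
  let d := if st.1.contains word = false then st.1.insert word 0
           else st.1.modify word 0 (· + 1)
  (d, st.2 ++ PySem.Int.toStr (d.getD word 0) ++ " ")

def words_counter (input_line : String) : String :=
  ((PySem.Str.split₀ input_line).foldl wcStepA (PySem.Dict.empty, "")).2

-- ===== PORT B =====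
-- inner loop body of B: for entry (i, u), if u is the current word, write str(k) at slot i and bump k
def wcInnerStep (w : String) (st : List String × Int) (p : Int × String) : List String × Int :=
  if p.2 == w then (st.1.set p.1.toNat (PySem.Int.toStr st.2), st.2 + 1) else st

-- outer loop body of B: number all occurrences of w over the whole word list into out
def wcOuterStep (words : List String) (out : List String) (w : String) : List String :=
  ((PySem.List.enumerate words).foldl (wcInnerStep w) (out, 0)).1

-- split once; number each distinct word's occurrences into slots; join the slots
def wcBody (words : List String) : String :=
  PySem.Str.join "" (((PySem.List.dedup words).foldl (wcOuterStep words)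
      (List.replicate words.length "")).map (fun p => p ++ " "))

def words_counter_alt (input_line : String) : String :=
  wcBody (PySem.Str.split₀ input_line)

-- ===== PRECONDITION & SPEC =====
def Spec_words_counter (input_line : String) (out : String) : Prop := out = words_counter_alt input_line
instance (input_line : String) (out : String) : Decidable (Spec_words_counter input_line out) := by unfold Spec_words_counter; infer_instance

-- ===== CLAIM (what is proved, stated in full; the proofs are below) =====
def Claim_equal_words_counter : Prop := ∀ (input_line : String), Dom_words_counter input_line → Spec_words_counter input_line (words_counter input_line)

-- ===== LEMMAS AND PROOFS =====

-- the common specification: for each word, str(its prior-occurrence count) plus a space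
def canonPieces : List String → List String → List String
  | _, [] => []
  | seen, x :: r => (PySem.Int.toStr ((seen.count x : Int)) ++ " ") :: canonPieces (seen ++ [x]) r

theorem flat_inter (l : List (List Char)) (a : List Char) :
    (List.intersperse ([]:List Char) (l ++ [a])).flatten
      = (List.intersperse ([]:List Char) l).flatten ++ a := by
  induction l with
  | nil => simp
  | cons x l ih =>
    cases l with
    | nil => simp [List.intersperse]
    | cons y t =>
      simp only [List.cons_append, List.intersperse] at ih ⊢
      simp [ih]

theorem join_empty_append (ps : List String) (p : String) :
    PySem.Str.join "" (ps ++ [p]) = PySem.Str.join "" ps ++ p := by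
  rw [← String.toList_inj]
  simp [PySem.Str.join, PySem.Chars.join, List.intercalate, flat_inter]

-- A-side loop invariant: the dict holds, for each already-seen word, its count so far minus one
theorem wc_loop_canon (ws : List String) (d : PySem.Dict String Int) (seen : List String)
    (acc : String) (ps : List String)
    (Hacc : acc = PySem.Str.join "" ps)
    (Hc : ∀ w, d.contains w = true ↔ w ∈ seen)
    (Hv : ∀ w ∈ seen, d.getD w 0 = (seen.count w : Int) - 1) :
    (ws.foldl wcStepA (d, acc)).2 = PySem.Str.join "" (ps ++ canonPieces seen ws) := by
  induction ws generalizing d seen acc ps with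
  | nil => simpa [canonPieces] using Hacc
  | cons x ws ih =>
    simp only [List.foldl_cons]
    have hcanon : canonPieces seen (x :: ws)
        = (PySem.Int.toStr ((seen.count x : Int)) ++ " ") :: canonPieces (seen ++ [x]) ws := rfl
    rw [hcanon, List.append_cons]
    by_cases hx : x ∈ seen
    · have hc : d.contains x = true := (Hc x).mpr hx
      have hstep : wcStepA (d, acc) x
          = (d.modify x 0 (· + 1), acc ++ PySem.Int.toStr ((seen.count x : Int)) ++ " ") := by
        have := Hv x hx
        simp [wcStepA, hc, PySem.Dict.getD_modify_self, this]
      rw [hstep]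
      apply ih
      · simp [Hacc, join_empty_append, String.append_assoc]
      · intro w
        rw [PySem.Dict.contains_modify]
        by_cases hw : w = x <;> simp [hw, Hc, hx]
      · intro w hw
        by_cases hwx : w = x
        · subst hwx
          rw [PySem.Dict.getD_modify_self, Hv w hx]
          simp [List.count_append]
        · rw [PySem.Dict.getD_modify_of_ne _ _ _ hwx]
          have hw' : w ∈ seen := by simpa [hwx] using hw
          rw [Hv w hw']
          simp [List.count_append, List.count_singleton]
          exact fun h => hwx h.symm
    · have hc : d.contains x = false := by
        by_contra h
        exact hx ((Hc x).mp (by simpa using h))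
      have hcount : seen.count x = 0 := List.count_eq_zero.mpr hx
      have hstep : wcStepA (d, acc) x
          = (d.insert x 0, acc ++ PySem.Int.toStr ((seen.count x : Int)) ++ " ") := by
        simp [wcStepA, hc, hcount]
      rw [hstep]
      apply ih
      · simp [Hacc, join_empty_append, String.append_assoc]
      · intro w
        rw [PySem.Dict.contains_insert]
        by_cases hw : w = x <;> simp [hw, Hc]
      · intro w hw
        by_cases hwx : w = x
        · subst hwx
          rw [PySem.Dict.getD_insert]
          simp [List.count_append, hcount]
        · rw [PySem.Dict.getD_insert]
          have hw' : w ∈ seen := by simpa [hwx] using hw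
          simp [hwx, Hv w hw', List.count_append, List.count_singleton]
          exact fun h => hwx h.symm

-- B-side: the inner fold preserves the slot list's length
theorem inner_len (w : String) (l : List (Int × String)) : ∀ (out : List String) (k : Int),
    ((l.foldl (wcInnerStep w) (out, k)).1).length = out.length := by
  induction l with
  | nil => intro out k; rfl
  | cons p l ih =>
    intro out k
    simp only [List.foldl_cons, wcInnerStep]
    by_cases hb : (p.2 == w) = true <;> simp [hb, ih]

-- B-side: what the inner fold over an enumerated suffix leaves at slot i
theorem inner_get (w : String) (i : Nat) (ws : List String) : ∀ (s : Nat) (out : List String) (k : Int),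
    s + ws.length ≤ out.length →
    (((PySem.List.enumerate ws (s : Int)).foldl (wcInnerStep w) (out, k)).1)[i]? =
      if s ≤ i ∧ ws[i - s]? = some w then
        some (PySem.Int.toStr (k + ((ws.take (i - s)).count w : Int)))
      else out[i]? := by
  induction ws with
  | nil =>
    intro s out k h
    simp [PySem.List.enumerate]
  | cons x r ih =>
    intro s out k h
    rw [List.length_cons] at h
    rw [PySem.List.enumerate_cons x r (s : Int)]
    simp only [List.foldl_cons]
    have hs1 : ((s : Int) + 1) = ((s + 1 : Nat) : Int) := by push_cast; rfl
    by_cases hx : (x == w) = true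
    · have hxw : x = w := by simpa using hx
      subst hxw
      have hstep : wcInnerStep x (out, k) ((s : Int), x)
          = (out.set s (PySem.Int.toStr k), k + 1) := by
        simp [wcInnerStep]
      rw [hstep, hs1, ih (s + 1) _ (k + 1) (by rw [List.length_set]; omega)]
      rcases Nat.lt_trichotomy i s with hlt | heq | hgt
      · have h1 : ¬ (s + 1 ≤ i) := by omega
        have h2 : ¬ (s ≤ i) := by omega
        simp [h1, h2, List.getElem?_set_ne (by omega : s ≠ i)]
      · subst heq
        have h1 : ¬ (i + 1 ≤ i) := by omega
        have hi : i < out.length := by omega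
        simp [h1, List.getElem?_set_self hi]
      · have h1 : s + 1 ≤ i := by omega
        have h2 : s ≤ i := by omega
        have hd : i - s = (i - (s + 1)) + 1 := by omega
        rw [hd]
        simp only [List.getElem?_cons_succ, List.take_succ_cons, h1, h2, true_and]
        by_cases hr : r[i - (s + 1)]? = some x
        · rw [if_pos hr, if_pos hr]
          congr 1
          congr 1
          simp [List.count_cons_self]
          ring
        · rw [if_neg hr, if_neg hr, List.getElem?_set_ne (by omega : s ≠ i)]
    · have hxw : ¬ (x = w) := by simpa using hx
      have hstep : wcInnerStep w (out, k) ((s : Int), x) = (out, k) := by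
        simp [wcInnerStep, hx]
      rw [hstep, hs1, ih (s + 1) _ k (by omega)]
      rcases Nat.lt_trichotomy i s with hlt | heq | hgt
      · have h1 : ¬ (s + 1 ≤ i) := by omega
        have h2 : ¬ (s ≤ i) := by omega
        simp [h1, h2]
      · subst heq
        have h1 : ¬ (i + 1 ≤ i) := by omega
        simp [h1, hxw]
      · have h1 : s + 1 ≤ i := by omega
        have h2 : s ≤ i := by omega
        have hd : i - s = (i - (s + 1)) + 1 := by omega
        rw [hd]
        simp [h1, h2, hxw]

-- B-side: what the outer fold leaves at slot i
theorem outer_get (ws : List String) (i : Nat) (wi : String) (hwi : ws[i]? = some wi) :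
    ∀ (ds : List String) (out : List String), ws.length ≤ out.length →
    (ds.foldl (wcOuterStep ws) out)[i]? =
      if wi ∈ ds then some (PySem.Int.toStr (((ws.take i).count wi : Int))) else out[i]? := by
  intro ds
  induction ds with
  | nil => intro out h; simp
  | cons d ds ih =>
    intro out h
    simp only [List.foldl_cons]
    have hlen : (wcOuterStep ws out d).length = out.length := inner_len d _ out 0
    rw [ih _ (by omega)]
    have hout1 : (wcOuterStep ws out d)[i]? =
        if d = wi then some (PySem.Int.toStr (((ws.take i).count wi : Int))) else out[i]? := by
      unfold wcOuterStep
      have := inner_get d i ws 0 out 0 (by omega)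
      simp only [Int.natCast_zero] at this
      rw [this]
      by_cases hd : d = wi
      · subst hd
        simp [hwi]
      · have hne : ¬ (ws[i]? = some d) := by
          rw [hwi]
          intro hcon
          exact hd (by injection hcon with h; exact h.symm)
        simp [hne, hd]
    by_cases hmem : wi ∈ ds
    · simp [hmem]
    · rw [if_neg hmem, hout1]
      by_cases hd : d = wi
      · simp [hd]
      · have : ¬ (wi ∈ d :: ds) := by
          simp [hmem]
          exact fun h => hd h.symm
        simp [hd, this]

theorem canon_getElem? (ws : List String) : ∀ (seen : List String) (i : Nat),
    (canonPieces seen ws)[i]? =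
      (ws[i]?).map (fun w => PySem.Int.toStr ((((seen ++ ws.take i).count w : Nat) : Int)) ++ " ") := by
  induction ws with
  | nil => intro seen i; simp [canonPieces]
  | cons x r ih =>
    intro seen i
    cases i with
    | zero => simp [canonPieces]
    | succ j =>
      simp only [canonPieces, List.getElem?_cons_succ, List.take_succ_cons, ih (seen ++ [x]) j]
      congr 1
      funext w
      congr 3
      simp

theorem outer_len (ws : List String) (ds : List String) : ∀ (out : List String),
    (ds.foldl (wcOuterStep ws) out).length = out.length := by
  induction ds with
  | nil => intro out; rfl
  | cons d ds ih =>
    intro out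
    simp only [List.foldl_cons]
    rw [ih]
    exact inner_len d _ out 0

theorem alt_eq_canon (ws : List String) :
    ((PySem.List.dedup ws).foldl (wcOuterStep ws) (List.replicate ws.length "")).map (fun p => p ++ " ")
      = canonPieces [] ws := by
  apply List.ext_getElem?
  intro i
  rw [List.getElem?_map, canon_getElem? ws [] i]
  by_cases hi : i < ws.length
  · have hwi : ws[i]? = some ws[i] := List.getElem?_eq_getElem hi
    have hmem : ws[i] ∈ PySem.List.dedup ws := by
      rw [PySem.List.mem_dedup]
      exact List.getElem_mem hi
    rw [outer_get ws i ws[i] hwi _ _ (by simp), if_pos hmem, hwi]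
    simp
  · have h1 : ws[i]? = none := List.getElem?_eq_none (by omega)
    have h2 : ((PySem.List.dedup ws).foldl (wcOuterStep ws) (List.replicate ws.length ""))[i]? = none := by
      apply List.getElem?_eq_none
      rw [outer_len]
      simp only [List.length_replicate]
      omega
    rw [h2, h1]
    simp

-- ===== VERDICT (by name: the statement is the Claim_ definition above) =====
theorem words_counter_spec : Claim_equal_words_counter := by
  intro s _
  unfold Spec_words_counter words_counter words_counter_alt wcBody
  rw [alt_eq_canon (PySem.Str.split₀ s)]
  simpa using wc_loop_canon (PySem.Str.split₀ s) PySem.Dict.empty [] "" []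
    (by simp [PySem.Str.join]) (by simp) (by simp)
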